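-- pv_equiv track=rewrite | github.com/0ssol1620-byte/commoditynode | scripts/ralph_autofix.py | ensure_excludes
-- ===== SOURCE A (Python) =====
-- INTERNAL_DOCS = [
--     "SEO-AUDIT-2026-04-04.md",
--     "ADSENSE_REVIEW_CHECKLIST.md",
--     "GSC_RESUBMISSION_PRIORITY.md",
--     "CHANGELOG.md",
--     "CHANGELOG_IMPLEMENTATION.md"
-- ]
--
-- def ensure_excludes(config_text: str):
--     changed = False
--     for doc in INTERNAL_DOCS:
--         line = f"  - {doc}"
--         if line not in config_text:
--             anchor = "  - SEO_AUDIT.md\n"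
--             if anchor in config_text:
--                 config_text = config_text.replace(anchor, anchor + line + "\n", 1)
--                 changed = True
--             else:
--                 exclude_anchor = "exclude:\n"
--                 if exclude_anchor in config_text:
--                     config_text = config_text.replace(exclude_anchor, exclude_anchor + line + "\n", 1)
--                     changed = True
--     return config_text, changed
-- ===== SOURCE B (Python) =====
-- INTERNAL_DOCS = [
--     "SEO-AUDIT-2026-04-04.md",
--     "ADSENSE_REVIEW_CHECKLIST.md",
--     "GSC_RESUBMISSION_PRIORITY.md",
--     "CHANGELOG.md",
--     "CHANGELOG_IMPLEMENTATION.md"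
-- ]
--
-- def ensure_excludes(config_text: str):
--     # pick the single insertion anchor once, up front
--     if "  - SEO_AUDIT.md\n" in config_text:
--         anchor = "  - SEO_AUDIT.md\n"
--     elif "exclude:\n" in config_text:
--         anchor = "exclude:\n"
--     else:
--         anchor = None
--     # docs whose line is absent from the ORIGINAL text, in order
--     missing = [doc for doc in INTERNAL_DOCS if f"  - {doc}" not in config_text]
--     if anchor is None or not missing:
--         return config_text, False
--     # one batched replace; reversed order reproduces insert-after-anchor semantics
--     block = "".join(f"  - {doc}\n" for doc in reversed(missing))
--     return config_text.replace(anchor, anchor + block, 1), True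
-- ===== Notes on version B (the rewrite author's own statement) =====
-- stated objective: simpler
-- what changed: Replaces A's per-doc loop of repeated membership tests and repeated single-occurrence replaces on the mutating text by: choose the anchor once, collect the missing docs in one pass over the original text, and do ONE replace inserting the whole (reversed) block after the anchor.
import Mathlib
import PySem

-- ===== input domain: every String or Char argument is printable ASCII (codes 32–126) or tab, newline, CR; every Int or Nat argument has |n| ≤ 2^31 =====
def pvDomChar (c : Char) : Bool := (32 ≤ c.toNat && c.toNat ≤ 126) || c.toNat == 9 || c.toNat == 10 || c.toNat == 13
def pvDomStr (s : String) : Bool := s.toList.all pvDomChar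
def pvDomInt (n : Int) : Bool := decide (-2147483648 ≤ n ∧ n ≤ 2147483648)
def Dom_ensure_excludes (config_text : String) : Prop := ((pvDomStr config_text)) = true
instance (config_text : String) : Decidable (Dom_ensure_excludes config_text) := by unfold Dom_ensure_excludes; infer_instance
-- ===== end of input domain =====

-- B replaces A's per-doc loop of repeated membership tests and single-occurrence replaces on the
-- mutating text by: pick the anchor once, collect missing docs in one pass over the original text,
-- and perform ONE replace inserting the whole reversed block (objective: simpler decomposition).

-- ===== PORT A =====
def pvDocs : List String :=
  ["SEO-AUDIT-2026-04-04.md", "ADSENSE_REVIEW_CHECKLIST.md", "GSC_RESUBMISSION_PRIORITY.md",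
   "CHANGELOG.md", "CHANGELOG_IMPLEMENTATION.md"]

def pvSeoAnchor : List Char := "  - SEO_AUDIT.md\n".toList
def pvExcAnchor : List Char := "exclude:\n".toList

def pvLine (doc : String) : List Char := "  - ".toList ++ doc.toList

-- hand port of Python's s.replace(old, new, 1) (count = 1): replace the FIRST occurrence of old,
-- scanning left to right; exact for nonempty old (both call sites pass a nonempty literal anchor)
def pvReplaceOnce : List Char → List Char → List Char → List Char
  | [], _, _ => []
  | c :: rest, old, new =>
    if old <+: c :: rest then new ++ (c :: rest).drop old.length
    else c :: pvReplaceOnce rest old new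

-- loop body of A, one doc per call (state = (config_text, changed))
def pvStep (st : List Char × Bool) (doc : String) : List Char × Bool :=
  if PySem.Chars.isIn (pvLine doc) st.1 then st
  else if PySem.Chars.isIn pvSeoAnchor st.1 then
    (pvReplaceOnce st.1 pvSeoAnchor (pvSeoAnchor ++ pvLine doc ++ ['\n']), true)
  else if PySem.Chars.isIn pvExcAnchor st.1 then
    (pvReplaceOnce st.1 pvExcAnchor (pvExcAnchor ++ pvLine doc ++ ['\n']), true)
  else st

def ensure_excludes (config_text : String) : String × Bool :=
  let r := pvDocs.foldl pvStep (config_text.toList, false)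
  (String.ofList r.1, r.2)

-- ===== PORT B =====
def pvUOf (doc : String) : List Char := pvLine doc ++ ['\n']

def ensure_excludes_alt (config_text : String) : String × Bool :=
  let s := config_text.toList
  let anchor? : Option (List Char) :=
    if PySem.Chars.isIn pvSeoAnchor s then some pvSeoAnchor
    else if PySem.Chars.isIn pvExcAnchor s then some pvExcAnchor
    else none
  let missing := pvDocs.filter (fun doc => !PySem.Chars.isIn (pvLine doc) s)
  match anchor? with
  | none => (config_text, false)
  | some a =>
    if missing.isEmpty then (config_text, false)
    else (String.ofList (pvReplaceOnce s a (a ++ (missing.reverse.map pvUOf).flatten)), true)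

-- ===== PRECONDITION & SPEC =====
def Spec_ensure_excludes (config_text : String) (out : String × Bool) : Prop := out = ensure_excludes_alt config_text
instance (config_text : String) (out : String × Bool) : Decidable (Spec_ensure_excludes config_text out) := by unfold Spec_ensure_excludes; infer_instance

-- ===== CLAIM (what is proved, stated in full; the proofs are below) =====
def Claim_equal_ensure_excludes : Prop := ∀ (config_text : String), Dom_ensure_excludes config_text → Spec_ensure_excludes config_text (ensure_excludes config_text)

-- ===== LEMMAS AND PROOFS =====
theorem pv_infix_append_cases {q x y : List Char} (h : q <:+: x ++ y) :
    q <:+: x ∨ q <:+: y ∨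
      ∃ q₁ q₂, q = q₁ ++ q₂ ∧ q₁ ≠ [] ∧ q₂ ≠ [] ∧ q₁ <:+ x ∧ q₂ <+: y := by
  induction x generalizing q with
  | nil => exact Or.inr (Or.inl (by simpa using h))
  | cons c x' ih =>
    rcases List.infix_cons_iff.mp (by simpa using h) with hp | hs
    · by_cases hlen : q.length ≤ (c :: x').length
      · left
        have hq : q <+: c :: x' := by
          have h1 := List.prefix_iff_eq_take.mp hp
          rw [show c :: (x' ++ y) = (c :: x') ++ y from rfl,
            List.take_append_of_le_length hlen] at h1
          exact h1 ▸ List.take_prefix _ _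
        exact hq.isInfix
      · rw [not_le] at hlen
        have hxp : (c :: x') <+: q :=
          List.prefix_of_prefix_length_le (List.prefix_append _ _) hp (le_of_lt hlen)
        obtain ⟨q₂, hq₂⟩ := hxp
        by_cases h2 : q₂ = []
        · left; subst h2; rw [← hq₂]; simp
        · right; right
          refine ⟨c :: x', q₂, hq₂.symm, by simp, h2, List.suffix_refl _, ?_⟩
          have : (c :: x') ++ q₂ <+: (c :: x') ++ y := hq₂ ▸ hp
          exact (List.prefix_append_right_inj _).mp this
    · rcases ih hs with h1 | h1 | ⟨q₁, q₂, he, hn1, hn2, hsx, hpy⟩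
      · exact Or.inl (List.infix_cons h1)
      · exact Or.inr (Or.inl h1)
      · exact Or.inr (Or.inr ⟨q₁, q₂, he, hn1, hn2, hsx.trans (List.suffix_cons c x'), hpy⟩)

theorem pv_getLast?_of_suffix {q₁ x : List Char} (h : q₁ <:+ x) (hq : q₁ ≠ []) :
    q₁.getLast? = x.getLast? := by
  obtain ⟨w, hw⟩ := h
  rw [← hw, List.getLast?_append_of_ne_nil w hq]

theorem pv_mem_append_iff {x y q : List Char} (hx : x.getLast? = some '\n')
    (hq : '\n' ∉ q.dropLast) : q <:+: x ++ y ↔ q <:+: x ∨ q <:+: y := by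
  constructor
  · intro h
    rcases pv_infix_append_cases h with h1 | h1 | ⟨q₁, q₂, he, hn1, hn2, hsx, hpy⟩
    · exact Or.inl h1
    · exact Or.inr h1
    · exfalso
      apply hq
    -- '\n' is the last char of q₁, hence in dropLast q
      have hl : q₁.getLast? = some '\n' := (pv_getLast?_of_suffix hsx hn1).trans hx
      have hmem : '\n' ∈ q₁ := List.mem_of_getLast? hl
      rw [he, List.dropLast_append_of_ne_nil hn2]
      exact List.mem_append_left _ hmem
  · rintro (h | h)
    · exact h.trans List.infix_append_left
    · exact h.trans List.infix_append_right

theorem pv_mem_insert_iff {x u y q : List Char} (hx : x.getLast? = some '\n')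
    (hu : u.getLast? = some '\n') (hq : '\n' ∉ q.dropLast) :
    q <:+: x ++ (u ++ y) ↔ q <:+: x ++ y ∨ q <:+: u := by
  rw [pv_mem_append_iff hx hq, pv_mem_append_iff hu hq, pv_mem_append_iff hx hq]
  tauto

theorem pv_mem_flatten_iff {x y q : List Char} {us : List (List Char)}
    (hx : x.getLast? = some '\n') (hus : ∀ u ∈ us, u.getLast? = some '\n')
    (hq : '\n' ∉ q.dropLast) :
    q <:+: x ++ (us.flatten ++ y) ↔ q <:+: x ++ y ∨ ∃ u ∈ us, q <:+: u := by
  induction us with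
  | nil => simp
  | cons u us ih =>
    rw [List.flatten_cons, List.append_assoc,
      pv_mem_insert_iff hx (hus u (by simp)) hq, ih (fun v hv => hus v (by simp [hv]))]
    simp only [List.mem_cons]
    constructor
    · rintro ((h | ⟨v, hv, h⟩) | h)
      · exact Or.inl h
      · exact Or.inr ⟨v, Or.inr hv, h⟩
      · exact Or.inr ⟨u, Or.inl rfl, h⟩
    · rintro (h | ⟨v, hv | hv, h⟩)
      · exact Or.inl (Or.inl h)
      · exact Or.inr (hv ▸ h)
      · exact Or.inl (Or.inr ⟨v, hv, h⟩)

theorem pv_replaceOnce_decomp {a : List Char} (ha : a ≠ []) :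
    ∀ {t : List Char}, a <:+: t →
      ∃ p s₀, t = p ++ a ++ s₀ ∧ ∀ n, pvReplaceOnce t a n = p ++ n ++ s₀ := by
  intro t
  induction t with
  | nil => intro h; exact absurd (List.eq_nil_of_infix_nil h) ha
  | cons c rest ih =>
    intro h
    by_cases hp : a <+: c :: rest
    · obtain ⟨w, hw⟩ := hp
      refine ⟨[], w, by simp [← hw], fun n => ?_⟩
      rw [show pvReplaceOnce (c :: rest) a n
            = if a <+: c :: rest then n ++ (c :: rest).drop a.length
              else c :: pvReplaceOnce rest a n from rfl,
        if_pos ⟨w, hw⟩, ← hw, List.drop_left]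
      simp
    · have h' : a <:+: rest := (List.infix_cons_iff.mp h).resolve_left hp
      obtain ⟨p, s₀, hrest, hrep⟩ := ih h'
      refine ⟨c :: p, s₀, by simp [hrest], fun n => ?_⟩
      rw [show pvReplaceOnce (c :: rest) a n
            = if a <+: c :: rest then n ++ (c :: rest).drop a.length
              else c :: pvReplaceOnce rest a n from rfl,
        if_neg hp, hrep n]
      simp

theorem pv_prefix_of_prefix_append {q x y : List Char} (h : q <+: x ++ y)
    (hl : q.length ≤ x.length) : q <+: x := by
  have h1 := List.prefix_iff_eq_take.mp h
  rw [List.take_append_of_le_length hl] at h1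
  exact h1 ▸ List.take_prefix _ _

theorem pv_not_prefix_replaceOnce {a u : List Char} {c : Char} {rest : List Char} (ha : a ≠ [])
    (hnp : ¬ a <+: c :: rest) (hin : a <:+: rest) :
    ¬ a <+: c :: pvReplaceOnce rest a (a ++ u) := by
  obtain ⟨p, s₀, hr, hrep⟩ := pv_replaceOnce_decomp ha hin
  rw [hrep]
  intro hcon
  have hcon' : a <+: (c :: p) ++ ((a ++ u) ++ s₀) := by simpa using hcon
  by_cases hlen : a.length ≤ (c :: p).length
  · exact hnp (by
      rw [hr, show c :: (p ++ a ++ s₀) = (c :: p) ++ (a ++ s₀) from by simp]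
      exact (pv_prefix_of_prefix_append hcon' hlen).trans (List.prefix_append _ _))
  · rw [not_le] at hlen
    have hxp : (c :: p) <+: a :=
      List.prefix_of_prefix_length_le (List.prefix_append _ _) hcon' (le_of_lt hlen)
    obtain ⟨a', ha'⟩ := hxp
    have h2 : (c :: p) ++ a' <+: (c :: p) ++ ((a ++ u) ++ s₀) := ha' ▸ hcon'
    have h3 : a' <+: (a ++ u) ++ s₀ := (List.prefix_append_right_inj _).mp h2
    have h4 : a' <+: a := by
      apply pv_prefix_of_prefix_append (by simpa [List.append_assoc] using h3)
      have := congrArg List.length ha'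
      simp at this
      omega
    have h5 : (c :: p) ++ a' <+: (c :: p) ++ (a ++ s₀) :=
      (List.prefix_append_right_inj _).mpr (h4.trans (List.prefix_append _ _))
    rw [ha'] at h5
    exact hnp (by rw [hr, show c :: (p ++ a ++ s₀) = (c :: p) ++ (a ++ s₀) from by simp]; exact h5)

theorem pv_replaceOnce_prefix {a n : List Char} (ha : a ≠ []) (w : List Char) :
    pvReplaceOnce (a ++ w) a n = n ++ w := by
  obtain ⟨a0, a', ha0⟩ : ∃ a0 a', a = a0 :: a' := by
    cases a with | nil => exact absurd rfl ha | cons x xs => exact ⟨x, xs, rfl⟩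
  subst ha0
  show pvReplaceOnce (a0 :: (a' ++ w)) (a0 :: a') n = n ++ w
  rw [show pvReplaceOnce (a0 :: (a' ++ w)) (a0 :: a') n
        = if (a0 :: a') <+: a0 :: (a' ++ w) then n ++ (a0 :: (a' ++ w)).drop (a0 :: a').length
          else a0 :: pvReplaceOnce (a' ++ w) (a0 :: a') n from rfl,
    if_pos (show (a0 :: a') <+: a0 :: (a' ++ w) from List.prefix_append _ _)]
  rw [show a0 :: (a' ++ w) = (a0 :: a') ++ w from rfl, List.drop_left]

theorem pv_replaceOnce_replaceOnce {a u v : List Char} (ha : a ≠ []) :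
    ∀ {t : List Char}, a <:+: t →
      pvReplaceOnce (pvReplaceOnce t a (a ++ u)) a (a ++ v)
        = pvReplaceOnce t a (a ++ (v ++ u)) := by
  intro t
  induction t with
  | nil => intro h; exact absurd (List.eq_nil_of_infix_nil h) ha
  | cons c rest ih =>
    intro h
    have unf : ∀ (t' : List Char) (c' : Char) (n : List Char),
        pvReplaceOnce (c' :: t') a n
          = if a <+: c' :: t' then n ++ (c' :: t').drop a.length
            else c' :: pvReplaceOnce t' a n := fun _ _ _ => rfl
    by_cases hp : a <+: c :: rest
    · obtain ⟨w, hw⟩ := hp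
      rw [← hw, pv_replaceOnce_prefix ha, pv_replaceOnce_prefix ha,
        show (a ++ u) ++ w = a ++ (u ++ w) from by simp, pv_replaceOnce_prefix ha]
      simp
    · have h' : a <:+: rest := (List.infix_cons_iff.mp h).resolve_left hp
      have hq := pv_not_prefix_replaceOnce (u := u) ha hp h'
      rw [unf, if_neg hp, unf, if_neg hq, ih h', unf, if_neg hp]

-- concrete facts about the five doc lines and the two anchors
theorem pv_docs_pairwise : ∀ d ∈ pvDocs, ∀ d' ∈ pvDocs, pvLine d <:+: pvUOf d' → d = d' := by decide
theorem pv_docs_no_nl : ∀ d ∈ pvDocs, '\n' ∉ pvLine d := by decide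
theorem pv_sa_not_in_u : ∀ d ∈ pvDocs, ¬ pvSeoAnchor <:+: pvUOf d := by decide
theorem pv_sa_last : pvSeoAnchor.getLast? = some '\n' := by decide
theorem pv_ea_last : pvExcAnchor.getLast? = some '\n' := by decide
theorem pv_sa_ne : pvSeoAnchor ≠ [] := by decide
theorem pv_ea_ne : pvExcAnchor ≠ [] := by decide
theorem pv_sa_good : '\n' ∉ pvSeoAnchor.dropLast := by decide
theorem pv_docs_nodup : pvDocs.Nodup := by decide

theorem pv_line_good {d : String} (hd : d ∈ pvDocs) : '\n' ∉ (pvLine d).dropLast :=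
  fun h => pv_docs_no_nl d hd (List.mem_of_mem_dropLast h)

theorem pv_uOf_last (d : String) : (pvUOf d).getLast? = some '\n' :=
  show (pvLine d ++ ['\n']).getLast? = some '\n' from List.getLast?_concat

-- membership in the text after inserting the block ms right behind the anchor
theorem pv_mem_closed_iff {a p s₀ : List Char} {ms : List (List Char)}
    (hal : a.getLast? = some '\n') (ha : a ≠ [])
    (hms : ∀ u ∈ ms, u.getLast? = some '\n')
    {q : List Char} (hq : '\n' ∉ q.dropLast) :
    q <:+: p ++ (a ++ ms.flatten) ++ s₀ ↔ q <:+: p ++ a ++ s₀ ∨ ∃ u ∈ ms, q <:+: u := by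
  have hx : (p ++ a).getLast? = some '\n' := by
    rw [List.getLast?_append_of_ne_nil p ha]; exact hal
  rw [show p ++ (a ++ ms.flatten) ++ s₀ = (p ++ a) ++ (ms.flatten ++ s₀) from by simp,
    pv_mem_flatten_iff hx hms hq,
    show (p ++ a) ++ s₀ = p ++ a ++ s₀ from by simp]

-- the two anchored loop invariants
theorem pv_loopSA (s p s₀ : List Char) (hs : s = p ++ pvSeoAnchor ++ s₀)
    (hrep : ∀ n, pvReplaceOnce s pvSeoAnchor n = p ++ n ++ s₀) :
    ∀ (ds : List String) (ms : List (List Char)) (ch : Bool), ds.Nodup →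
      (∀ d ∈ ds, d ∈ pvDocs) → (∀ u ∈ ms, u.getLast? = some '\n') →
      (∀ d ∈ ds, ∀ u ∈ ms, ¬ pvLine d <:+: u) →
      ds.foldl pvStep (pvReplaceOnce s pvSeoAnchor (pvSeoAnchor ++ ms.flatten), ch)
        = (pvReplaceOnce s pvSeoAnchor
             (pvSeoAnchor ++ (((ds.filter fun d => !PySem.Chars.isIn (pvLine d) s).reverse.map pvUOf).flatten ++ ms.flatten)),
           ch || !(ds.filter fun d => !PySem.Chars.isIn (pvLine d) s).isEmpty) := by
  intro ds
  induction ds with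
  | nil => intro ms ch _ _ _ _; simp
  | cons d ds' ih =>
    intro ms ch hnd hdocs hms hcross
    have hd : d ∈ pvDocs := hdocs d (List.mem_cons_self)
    have hnd' := List.nodup_cons.mp hnd
    have hclosed : pvReplaceOnce s pvSeoAnchor (pvSeoAnchor ++ ms.flatten)
        = p ++ (pvSeoAnchor ++ ms.flatten) ++ s₀ := hrep _
    have hiff : pvLine d <:+: pvReplaceOnce s pvSeoAnchor (pvSeoAnchor ++ ms.flatten)
        ↔ pvLine d <:+: s := by
      rw [hclosed, pv_mem_closed_iff pv_sa_last pv_sa_ne hms (pv_line_good hd), ← hs]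
      constructor
      · rintro (h | ⟨u, hu, h⟩)
        · exact h
        · exact absurd h (hcross d (List.mem_cons_self) u hu)
      · exact Or.inl
    have htest : PySem.Chars.isIn (pvLine d) (pvReplaceOnce s pvSeoAnchor (pvSeoAnchor ++ ms.flatten))
        = PySem.Chars.isIn (pvLine d) s := by
      cases hb : PySem.Chars.isIn (pvLine d) s with
      | false =>
        exact (PySem.Chars.isIn_eq_false_iff _ _).mpr
          (fun hcon => (PySem.Chars.isIn_eq_false_iff _ _).mp hb (hiff.mp hcon))
      | true => exact (PySem.Chars.isIn_iff_infix _ _).mpr (hiff.mpr ((PySem.Chars.isIn_iff_infix _ _).mp hb))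
    rw [List.foldl_cons]
    cases hb : PySem.Chars.isIn (pvLine d) s with
    | true =>
      have hstep : pvStep (pvReplaceOnce s pvSeoAnchor (pvSeoAnchor ++ ms.flatten), ch) d
          = (pvReplaceOnce s pvSeoAnchor (pvSeoAnchor ++ ms.flatten), ch) := by
        simp [pvStep, htest, hb]
      rw [hstep, ih ms ch hnd'.2 (fun x hx => hdocs x (List.mem_cons_of_mem d hx)) hms
        (fun x hx u hu => hcross x (List.mem_cons_of_mem d hx) u hu)]
      simp [hb]
    | false =>
      have hanch : PySem.Chars.isIn pvSeoAnchor (pvReplaceOnce s pvSeoAnchor (pvSeoAnchor ++ ms.flatten)) = true := by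
        rw [PySem.Chars.isIn_iff_infix, hclosed]
        exact ⟨p, ms.flatten ++ s₀, by simp⟩
      have hstep : pvStep (pvReplaceOnce s pvSeoAnchor (pvSeoAnchor ++ ms.flatten), ch) d
          = (pvReplaceOnce s pvSeoAnchor (pvSeoAnchor ++ (pvUOf d :: ms).flatten), true) := by
        simp only [pvStep, htest, hb, hanch, Bool.false_eq_true, if_false, if_true]
        rw [show pvSeoAnchor ++ pvLine d ++ ['\n'] = pvSeoAnchor ++ pvUOf d from by
              simp [pvUOf, List.append_assoc],
          pv_replaceOnce_replaceOnce pv_sa_ne ⟨p, s₀, by rw [hs]⟩, ← List.flatten_cons]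
      rw [hstep, ih (pvUOf d :: ms) true hnd'.2
        (fun x hx => hdocs x (List.mem_cons_of_mem d hx))
        (by intro u hu
            rcases List.mem_cons.mp hu with rfl | hu
            · exact pv_uOf_last d
            · exact hms u hu)
        (by intro x hx u hu
            rcases List.mem_cons.mp hu with rfl | hu
            · intro hcon
              exact hnd'.1 (pv_docs_pairwise x (hdocs x (List.mem_cons_of_mem d hx)) d hd hcon ▸ hx)
            · exact hcross x (List.mem_cons_of_mem d hx) u hu)]
      rw [List.filter_cons]
      simp only [hb, Bool.not_false, if_true]
      rw [Prod.mk.injEq]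
      refine ⟨?_, by simp⟩
      congr 1
      simp [List.flatten_append, List.append_assoc]


theorem pv_loopEA (s p s₀ : List Char) (hs : s = p ++ pvExcAnchor ++ s₀)
    (hrep : ∀ n, pvReplaceOnce s pvExcAnchor n = p ++ n ++ s₀)
    (hsa : ¬ pvSeoAnchor <:+: s) :
    ∀ (ds : List String) (ms : List (List Char)) (ch : Bool), ds.Nodup →
      (∀ d ∈ ds, d ∈ pvDocs) → (∀ u ∈ ms, u.getLast? = some '\n') →
      (∀ d ∈ ds, ∀ u ∈ ms, ¬ pvLine d <:+: u) →
      (∀ u ∈ ms, ¬ pvSeoAnchor <:+: u) →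
      ds.foldl pvStep (pvReplaceOnce s pvExcAnchor (pvExcAnchor ++ ms.flatten), ch)
        = (pvReplaceOnce s pvExcAnchor
             (pvExcAnchor ++ (((ds.filter fun d => !PySem.Chars.isIn (pvLine d) s).reverse.map pvUOf).flatten ++ ms.flatten)),
           ch || !(ds.filter fun d => !PySem.Chars.isIn (pvLine d) s).isEmpty) := by
  intro ds
  induction ds with
  | nil => intro ms ch _ _ _ _ _; simp
  | cons d ds' ih =>
    intro ms ch hnd hdocs hms hcross hsams
    have hd : d ∈ pvDocs := hdocs d (List.mem_cons_self)
    have hnd' := List.nodup_cons.mp hnd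
    have hclosed : pvReplaceOnce s pvExcAnchor (pvExcAnchor ++ ms.flatten)
        = p ++ (pvExcAnchor ++ ms.flatten) ++ s₀ := hrep _
    have hiff : pvLine d <:+: pvReplaceOnce s pvExcAnchor (pvExcAnchor ++ ms.flatten)
        ↔ pvLine d <:+: s := by
      rw [hclosed, pv_mem_closed_iff pv_ea_last pv_ea_ne hms (pv_line_good hd), ← hs]
      constructor
      · rintro (h | ⟨u, hu, h⟩)
        · exact h
        · exact absurd h (hcross d (List.mem_cons_self) u hu)
      · exact Or.inl
    have htest : PySem.Chars.isIn (pvLine d) (pvReplaceOnce s pvExcAnchor (pvExcAnchor ++ ms.flatten))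
        = PySem.Chars.isIn (pvLine d) s := by
      cases hb : PySem.Chars.isIn (pvLine d) s with
      | false =>
        exact (PySem.Chars.isIn_eq_false_iff _ _).mpr
          (fun hcon => (PySem.Chars.isIn_eq_false_iff _ _).mp hb (hiff.mp hcon))
      | true => exact (PySem.Chars.isIn_iff_infix _ _).mpr (hiff.mpr ((PySem.Chars.isIn_iff_infix _ _).mp hb))
    have hsat : PySem.Chars.isIn pvSeoAnchor (pvReplaceOnce s pvExcAnchor (pvExcAnchor ++ ms.flatten)) = false := by
      apply (PySem.Chars.isIn_eq_false_iff _ _).mpr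
      rw [hclosed]
      intro hcon
      rcases (pv_mem_closed_iff pv_ea_last pv_ea_ne hms pv_sa_good).mp hcon with h | ⟨u, hu, h⟩
      · exact hsa (hs ▸ h)
      · exact hsams u hu h
    rw [List.foldl_cons]
    cases hb : PySem.Chars.isIn (pvLine d) s with
    | true =>
      have hstep : pvStep (pvReplaceOnce s pvExcAnchor (pvExcAnchor ++ ms.flatten), ch) d
          = (pvReplaceOnce s pvExcAnchor (pvExcAnchor ++ ms.flatten), ch) := by
        simp [pvStep, htest, hb]
      rw [hstep, ih ms ch hnd'.2 (fun x hx => hdocs x (List.mem_cons_of_mem d hx)) hms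
        (fun x hx u hu => hcross x (List.mem_cons_of_mem d hx) u hu) hsams]
      simp [hb]
    | false =>
      have hanch : PySem.Chars.isIn pvExcAnchor (pvReplaceOnce s pvExcAnchor (pvExcAnchor ++ ms.flatten)) = true := by
        rw [PySem.Chars.isIn_iff_infix, hclosed]
        exact ⟨p, ms.flatten ++ s₀, by simp⟩
      have hstep : pvStep (pvReplaceOnce s pvExcAnchor (pvExcAnchor ++ ms.flatten), ch) d
          = (pvReplaceOnce s pvExcAnchor (pvExcAnchor ++ (pvUOf d :: ms).flatten), true) := by
        simp only [pvStep, htest, hb, hsat, hanch, Bool.false_eq_true, if_false, if_true]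
        rw [show pvExcAnchor ++ pvLine d ++ ['\n'] = pvExcAnchor ++ pvUOf d from by
              simp [pvUOf, List.append_assoc],
          pv_replaceOnce_replaceOnce pv_ea_ne ⟨p, s₀, by rw [hs]⟩, ← List.flatten_cons]
      rw [hstep, ih (pvUOf d :: ms) true hnd'.2
        (fun x hx => hdocs x (List.mem_cons_of_mem d hx))
        (by intro u hu
            rcases List.mem_cons.mp hu with rfl | hu
            · exact pv_uOf_last d
            · exact hms u hu)
        (by intro x hx u hu
            rcases List.mem_cons.mp hu with rfl | hu
            · intro hcon
              exact hnd'.1 (pv_docs_pairwise x (hdocs x (List.mem_cons_of_mem d hx)) d hd hcon ▸ hx)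
            · exact hcross x (List.mem_cons_of_mem d hx) u hu)
        (by intro u hu
            rcases List.mem_cons.mp hu with rfl | hu
            · exact pv_sa_not_in_u d hd
            · exact hsams u hu)]
      rw [List.filter_cons]
      simp only [hb, Bool.not_false, if_true]
      rw [Prod.mk.injEq]
      refine ⟨?_, by simp⟩
      congr 1
      simp [List.flatten_append, List.append_assoc]

theorem pv_loopNone (s : List Char) (h1 : PySem.Chars.isIn pvSeoAnchor s = false)
    (h2 : PySem.Chars.isIn pvExcAnchor s = false) :
    ∀ (ds : List String) (ch : Bool), ds.foldl pvStep (s, ch) = (s, ch) := by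
  intro ds
  induction ds with
  | nil => intro ch; rfl
  | cons d ds' ih =>
    intro ch
    have hstep : pvStep (s, ch) d = (s, ch) := by
      cases hb : PySem.Chars.isIn (pvLine d) s <;> simp [pvStep, h1, h2, hb]
    rw [List.foldl_cons, hstep, ih ch]

-- ===== VERDICT (by name: the statement is the Claim_ definition above) =====
theorem ensure_excludes_spec : Claim_equal_ensure_excludes := by
  unfold Claim_equal_ensure_excludes
  intro config_text _
  unfold Spec_ensure_excludes ensure_excludes ensure_excludes_alt
  cases hSA : PySem.Chars.isIn pvSeoAnchor config_text.toList with
  | true =>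
    have hin : pvSeoAnchor <:+: config_text.toList := (PySem.Chars.isIn_iff_infix _ _).mp hSA
    obtain ⟨p, s₀, hs, hrep⟩ := pv_replaceOnce_decomp pv_sa_ne hin
    have h0 : (config_text.toList, false)
        = (pvReplaceOnce config_text.toList pvSeoAnchor (pvSeoAnchor ++ ([] : List (List Char)).flatten), false) := by
      rw [hrep]
      refine congrArg (fun z => (z, false)) ?_
      simpa using hs
    have hloop := pv_loopSA config_text.toList p s₀ hs hrep pvDocs [] false pv_docs_nodup
      (fun d hd => hd) (by simp) (by simp)
    simp only [h0, hloop, hSA, if_true]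
    cases hm : (pvDocs.filter fun d => !PySem.Chars.isIn (pvLine d) config_text.toList).isEmpty with
    | true =>
      have hnil := List.isEmpty_iff.mp hm
      rw [hnil]
      simp only [List.map_nil, List.reverse_nil, List.flatten_nil, List.append_nil]
      rw [hrep, ← hs]
      simp
    | false =>
      simp
  | false =>
    cases hEA : PySem.Chars.isIn pvExcAnchor config_text.toList with
    | true =>
      have hin : pvExcAnchor <:+: config_text.toList := (PySem.Chars.isIn_iff_infix _ _).mp hEA
      obtain ⟨p, s₀, hs, hrep⟩ := pv_replaceOnce_decomp pv_ea_ne hin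
      have h0 : (config_text.toList, false)
          = (pvReplaceOnce config_text.toList pvExcAnchor (pvExcAnchor ++ ([] : List (List Char)).flatten), false) := by
        rw [hrep]
        refine congrArg (fun z => (z, false)) ?_
        simpa using hs
      have hloop := pv_loopEA config_text.toList p s₀ hs hrep
        ((PySem.Chars.isIn_eq_false_iff _ _).mp hSA) pvDocs [] false pv_docs_nodup
        (fun d hd => hd) (by simp) (by simp) (by simp)
      simp only [h0, hloop, hSA, hEA, Bool.false_eq_true, if_false, if_true]
      cases hm : (pvDocs.filter fun d => !PySem.Chars.isIn (pvLine d) config_text.toList).isEmpty with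
      | true =>
        have hnil := List.isEmpty_iff.mp hm
        rw [hnil]
        simp only [List.map_nil, List.reverse_nil, List.flatten_nil, List.append_nil]
        rw [hrep, ← hs]
        simp
      | false =>
        simp
    | false =>
      rw [pv_loopNone config_text.toList hSA hEA pvDocs false]
      simp [hSA, hEA, String.ofList_toList]
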